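-- pv_equiv track=rewrite | github.com/Sunnny7806/Project-Euler | 5 Difficulty Problems/92.Square Digit Chains.py | number_square
-- ===== SOURCE A (Python) =====
-- def number_square(x):
--     x = str(x)
--     total = 0
--     for i in x:
--         total += int(i)**2
--     if total == 1:
--         return False
--     elif total == 89:
--         return True
--     else:
--         return number_square(total)
-- ===== SOURCE B (Python) =====
-- def number_square(x):
--     n = x
--     while n != 1 and n != 89:
--         s = 0
--         while n:
--             n, d = divmod(n, 10)
--             s += d * d
--         n = s
--     return n == 89
-- ===== Notes on version B (the rewrite author's own statement) =====
-- stated objective: alternative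
-- what changed: Replaced the self-recursion through str()/int() digit parsing with an iterative while-loop that extracts digits arithmetically via divmod and checks the current chain value against 1 and 89 before each step.
import Mathlib
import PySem

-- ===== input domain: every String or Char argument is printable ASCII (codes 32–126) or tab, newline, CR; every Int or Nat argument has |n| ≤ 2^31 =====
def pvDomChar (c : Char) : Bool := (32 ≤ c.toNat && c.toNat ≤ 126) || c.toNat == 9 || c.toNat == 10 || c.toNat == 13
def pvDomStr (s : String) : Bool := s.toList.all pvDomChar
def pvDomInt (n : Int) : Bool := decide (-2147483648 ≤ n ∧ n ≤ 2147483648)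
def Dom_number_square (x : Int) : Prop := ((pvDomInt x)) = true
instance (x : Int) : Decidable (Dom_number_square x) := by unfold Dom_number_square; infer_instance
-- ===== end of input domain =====

-- B replaces A's str()/int()-based self-recursion by an iterative loop that extracts
-- digits arithmetically with divmod (objective: alternative algorithm, no string round-trip).


-- ===== PORT A =====
-- the digit-square sum A computes in its for-loop over str(x); int(i) via ofChars?
-- ('-' would raise ValueError in Python, excluded by Pre_; getD 0 there)
def pvSquaresTotal (x : Int) : Int :=
  (PySem.Int.toStr x).toList.foldl
    (fun total c => total + ((PySem.Int.ofChars? [c]).getD 0) ^ 2) 0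

-- A's self-recursion, with fuel as a pure totality guard (Python recurses unboundedly;
-- on Pre_ the chain settles well within this fuel, see the proofs below)
def pvGoA : Nat → Int → Bool
  | 0, _ => false
  | f+1, x =>
    let total := pvSquaresTotal x
    if total = 1 then false
    else if total = 89 then true
    else pvGoA f total

def number_square (x : Int) : Bool := pvGoA (x.natAbs + 1000) x

-- ===== PORT B =====
-- Source B's inner 'while n: n, d = divmod(n, 10); s += d * d' (fuel only as totality guard:
-- for n ≥ 0 it is never exhausted)
def pvDigitLoop : Nat → Int → Int → Int
  | 0, _, s => s
  | f+1, n, s =>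
    if n ≠ 0 then pvDigitLoop f (PySem.Int.floordiv n 10) (s + PySem.Int.mod n 10 * PySem.Int.mod n 10)
    else s

-- Source B's outer 'while n != 1 and n != 89' loop, returning n == 89
def pvOuterLoop : Nat → Int → Bool
  | 0, n => n == 89
  | f+1, n =>
    if n ≠ 1 ∧ n ≠ 89 then pvOuterLoop f (pvDigitLoop (n.natAbs + 1) n 0)
    else n == 89

def number_square_alt (x : Int) : Bool := pvOuterLoop (x.natAbs + 1000) x

-- ===== PRECONDITION & SPEC =====
-- Pre_ excludes exactly the inputs where Python A never returns: x < 0 raises ValueError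
-- (int('-')) and x = 0 raises RecursionError (total stays 0 forever).
def Pre_number_square (x : Int) : Prop := 1 ≤ x
instance (x : Int) : Decidable (Pre_number_square x) := by unfold Pre_number_square; infer_instance
def pvWitness_number_square : Int := (7)
def Spec_number_square (x : Int) (out : Bool) : Prop := out = number_square_alt x
instance (x : Int) (out : Bool) : Decidable (Spec_number_square x out) := by unfold Spec_number_square; infer_instance

-- ===== CLAIM (what is proved, stated in full; the proofs are below) =====
def Claim_equal_number_square : Prop := ∀ (x : Int), Dom_number_square x → Pre_number_square x → Spec_number_square x (number_square x)

-- ===== LEMMAS AND PROOFS =====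

-- arithmetic digit-square sum on Nat, fuelled structurally (fuel ≥ n suffices)
def pvDssF : Nat → Nat → Nat
  | 0, _ => 0
  | f+1, n => if n = 0 then 0 else pvDssF f (n / 10) + (n % 10) ^ 2

def pvDss (n : Nat) : Nat := pvDssF n n

lemma pvDssF_zero (f : Nat) : pvDssF f 0 = 0 := by cases f <;> simp [pvDssF]

lemma pvDssF_irrel : ∀ (f g n : Nat), n ≤ f → n ≤ g → pvDssF f n = pvDssF g n := by
  intro f
  induction f with
  | zero => intro g n hf _; interval_cases n; simp [pvDssF_zero]
  | succ f ih =>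
    intro g n hf hg
    rcases Nat.eq_zero_or_pos n with rfl | hn
    · simp [pvDssF_zero]
    · obtain ⟨g', rfl⟩ : ∃ g', g = g' + 1 := ⟨g - 1, by omega⟩
      have h10 : n / 10 < n := Nat.div_lt_self hn (by norm_num)
      simp only [pvDssF, if_neg (by omega : ¬ n = 0)]
      rw [ih g' (n / 10) (by omega) (by omega)]

lemma pvDss_succ (n : Nat) (hn : 1 ≤ n) : pvDss n = pvDss (n / 10) + (n % 10) ^ 2 := by
  obtain ⟨m, rfl⟩ : ∃ m, n = m + 1 := ⟨n - 1, by omega⟩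
  have h10 : (m + 1) / 10 < m + 1 := Nat.div_lt_self (by omega) (by norm_num)
  simp only [pvDss, pvDssF, if_neg (by omega : ¬ m + 1 = 0)]
  rw [pvDssF_irrel m ((m+1)/10) ((m+1)/10) (by omega) le_rfl]

lemma pvDss_pos : ∀ n : Nat, 1 ≤ n → 1 ≤ pvDss n := by
  intro n
  induction n using Nat.strong_induction_on with
  | _ n ih =>
    intro hn
    rw [pvDss_succ n hn]
    rcases Nat.eq_zero_or_pos (n % 10) with h | h
    · have hq : 1 ≤ n / 10 := by omega
      have := ih (n / 10) (Nat.div_lt_self hn (by norm_num)) hq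
      omega
    · have : 1 ≤ (n % 10) ^ 2 := Nat.one_le_pow _ _ h
      omega

set_option maxRecDepth 10000 in
lemma pvDss_small : ((List.range 1000).all fun n => n < 100 || decide (pvDss n < n)) = true := by decide

lemma pvDss_lt : ∀ n : Nat, 100 ≤ n → pvDss n < n := by
  intro n
  induction n using Nat.strong_induction_on with
  | _ n ih =>
    intro hn
    rcases Nat.lt_or_ge n 1000 with h | h
    · have := List.all_eq_true.mp pvDss_small n (List.mem_range.mpr h)
      simpa [Nat.not_lt.mpr hn] using this
    · have hq : 100 ≤ n / 10 := by omega
      have h1 := ih (n / 10) (Nat.div_lt_self (by omega) (by norm_num)) hq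
      have h2 : (n % 10) ^ 2 ≤ 81 := by
        have h9 : n % 10 ≤ 9 := by omega
        calc (n % 10) ^ 2 ≤ 9 ^ 2 := Nat.pow_le_pow_left h9 2
          _ = 81 := by norm_num
      rw [pvDss_succ n (by omega)]
      omega

-- the reference chain: Some false / Some true once the chain from n settles at 1 / 89
def pvHits : Nat → Nat → Option Bool
  | 0, _ => none
  | f+1, n =>
    if n = 1 then some false
    else if n = 89 then some true
    else pvHits f (pvDss n)

lemma pvHits_mono : ∀ (f g n : Nat) (b : Bool), pvHits f n = some b → f ≤ g → pvHits g n = some b := by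
  intro f
  induction f with
  | zero => intro g n b h; simp [pvHits] at h
  | succ f ih =>
    intro g n b h hfg
    obtain ⟨g', rfl⟩ : ∃ g', g = g' + 1 := ⟨g - 1, by omega⟩
    by_cases h1 : n = 1
    · simp_all [pvHits]
    · by_cases h89 : n = 89
      · simp_all [pvHits]
      · simp only [pvHits, if_neg h1, if_neg h89] at h ⊢
        exact ih g' _ b h (by omega)

set_option maxRecDepth 10000 in
lemma pvHits_base : ((List.range 100).all fun n => n == 0 || (pvHits 50 n).isSome) = true := by decide

lemma pvHits_total : ∀ n : Nat, 1 ≤ n → (pvHits (n + 50) n).isSome := by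
  intro n
  induction n using Nat.strong_induction_on with
  | _ n ih =>
    intro hn
    rcases Nat.lt_or_ge n 100 with h | h
    · have := List.all_eq_true.mp pvHits_base n (List.mem_range.mpr h)
      simp only [Bool.or_eq_true, beq_iff_eq] at this
      rcases this with rfl | hs
      · omega
      · obtain ⟨b, hb⟩ := Option.isSome_iff_exists.mp hs
        exact Option.isSome_iff_exists.mpr ⟨b, pvHits_mono 50 (n + 50) n b hb (by omega)⟩
    · have hlt := pvDss_lt n h
      have hpos := pvDss_pos n (by omega)
      have hrec := ih (pvDss n) hlt hpos
      obtain ⟨b, hb⟩ := Option.isSome_iff_exists.mp hrec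
      have : pvHits (n + 49) (pvDss n) = some b := pvHits_mono _ _ _ b hb (by omega)
      simp only [pvHits, if_neg (by omega : ¬ n = 1), if_neg (by omega : ¬ n = 89)]
      exact Option.isSome_iff_exists.mpr ⟨b, this⟩

-- parsing a digit char back gives the digit
lemma pvParse_digitChar (k : Nat) (hk : k < 10) :
    ((PySem.Int.ofChars? [Nat.digitChar k]).getD 0) = (k : Int) := by
  interval_cases k <;> decide

-- sum of squared parsed chars, as a plain sum
def pvSumSq (cs : List Char) : Int :=
  (cs.map fun c => ((PySem.Int.ofChars? [c]).getD 0) ^ 2).sum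

lemma pvFoldl_sumSq (cs : List Char) (t : Int) :
    cs.foldl (fun total c => total + ((PySem.Int.ofChars? [c]).getD 0) ^ 2) t = t + pvSumSq cs := by
  induction cs generalizing t with
  | nil => simp [pvSumSq]
  | cons c cs ih => simp [pvSumSq, ih, List.map_cons, List.sum_cons]; ring

lemma pvSumSq_toDigitsCore : ∀ (fuel m : Nat) (ds : List Char), m < fuel →
    pvSumSq (Nat.toDigitsCore 10 fuel m ds) = (pvDss m : Int) + pvSumSq ds := by
  intro fuel
  induction fuel with
  | zero => intro m ds h; omega
  | succ f ih =>
    intro m ds hm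
    rcases Nat.eq_zero_or_pos m with rfl | hpos
    · simp [Nat.toDigitsCore, pvDss, pvDssF_zero, pvSumSq, pvParse_digitChar 0 (by norm_num)]
    · have hd : pvSumSq (Nat.digitChar (m % 10) :: ds) = ((m % 10 : Nat) : Int) ^ 2 + pvSumSq ds := by
        simp [pvSumSq, pvParse_digitChar (m % 10) (by omega)]
      by_cases hq : m / 10 = 0
      · have hms : pvDss m = (m % 10) ^ 2 := by
          rw [pvDss_succ m hpos, hq]; simp [pvDss, pvDssF_zero]
        simp only [Nat.toDigitsCore, hq, reduceIte]
        rw [hd, hms]; push_cast; ring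
      · have hq1 : 1 ≤ m / 10 := by omega
        have hqf : m / 10 < f := by
          have : m / 10 < m := Nat.div_lt_self hpos (by norm_num)
          omega
        simp only [Nat.toDigitsCore, if_neg hq]
        rw [ih (m / 10) (Nat.digitChar (m % 10) :: ds) hqf, hd,
            pvDss_succ m hpos]
        push_cast; ring

-- A's string-based digit-square sum is the arithmetic one
lemma pvSquaresTotal_eq (n : Nat) : pvSquaresTotal (n : Int) = (pvDss n : Int) := by
  have h1 : (PySem.Int.toStr (n : Int)).toList = Nat.toDigits 10 n := by
    rw [PySem.Int.toList_toStr]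
    simp [PySem.Int.toChars]
  rw [pvSquaresTotal, h1, pvFoldl_sumSq, Nat.toDigits,
      pvSumSq_toDigitsCore (n + 1) n [] (by omega)]
  simp [pvSumSq]

-- B's inner loop computes the arithmetic digit-square sum
lemma pvDigitLoop_succ (f : Nat) (n s : Int) :
    pvDigitLoop (f + 1) n s =
      if n ≠ 0 then pvDigitLoop f (PySem.Int.floordiv n 10) (s + PySem.Int.mod n 10 * PySem.Int.mod n 10)
      else s := rfl

lemma pvDigitLoop_eq : ∀ (f n : Nat) (s : Int), n ≤ f →
    pvDigitLoop (f + 1) (n : Int) s = s + (pvDss n : Int) := by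
  intro f
  induction f with
  | zero =>
    intro n s h
    interval_cases n
    simp [pvDigitLoop, pvDss, pvDssF]
  | succ f ih =>
    intro n s h
    rcases Nat.eq_zero_or_pos n with rfl | hpos
    · simp [pvDigitLoop, pvDss, pvDssF_zero]
    · have hq : n / 10 ≤ f := by
        have : n / 10 < n := Nat.div_lt_self hpos (by norm_num)
        omega
      rw [pvDigitLoop_succ, if_pos (by exact_mod_cast (by omega : (n : Int) ≠ 0))]
      have hfd : PySem.Int.floordiv (n : Int) 10 = ((n / 10 : Nat) : Int) := by
        exact_mod_cast PySem.Int.floordiv_natCast n 10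
      have hmd : PySem.Int.mod (n : Int) 10 = ((n % 10 : Nat) : Int) := by
        exact_mod_cast PySem.Int.mod_natCast n 10
      rw [hfd, hmd, ih (n / 10) _ hq, pvDss_succ n hpos]
      push_cast; ring

-- A's recursion returns b once the chain from its FIRST digit-square sum settles at b
lemma pvGoA_eq : ∀ (f : Nat), ∀ (n g : Nat) (b : Bool),
    pvHits f (pvDss n) = some b → f ≤ g → pvGoA (g + 1) (n : Int) = b := by
  intro f
  induction f with
  | zero => intro n g b h _; simp [pvHits] at h
  | succ f ih =>
    intro n g b h hfg
    simp only [pvGoA, pvSquaresTotal_eq]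
    by_cases h1 : pvDss n = 1
    · simp_all [pvHits]
    · by_cases h89 : pvDss n = 89
      · simp_all [pvHits]
      · simp only [pvHits, if_neg h1, if_neg h89] at h
        obtain ⟨g', rfl⟩ : ∃ g', g = g' + 1 := ⟨g - 1, by omega⟩
        simp only [if_neg (by exact_mod_cast h1 : ¬ ((pvDss n : Int) = 1)),
          if_neg (by exact_mod_cast h89 : ¬ ((pvDss n : Int) = 89))]
        exact ih (pvDss n) g' b h (by omega)

-- B's outer loop returns b once the chain from n itself settles at b
lemma pvOuterLoop_eq : ∀ (f : Nat), ∀ (n g : Nat) (b : Bool),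
    pvHits f n = some b → f ≤ g → pvOuterLoop g (n : Int) = b := by
  intro f
  induction f with
  | zero => intro n g b h _; simp [pvHits] at h
  | succ f ih =>
    intro n g b h hfg
    obtain ⟨g', rfl⟩ : ∃ g', g = g' + 1 := ⟨g - 1, by omega⟩
    by_cases h1 : n = 1
    · subst h1; simp_all [pvHits, pvOuterLoop]
    · by_cases h89 : n = 89
      · subst h89; simp_all [pvHits, pvOuterLoop]
      · simp only [pvHits, if_neg h1, if_neg h89] at h
        simp only [pvOuterLoop,
          if_pos (⟨by exact_mod_cast h1, by exact_mod_cast h89⟩ : (n : Int) ≠ 1 ∧ (n : Int) ≠ 89)]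
        have hnat : (n : Int).natAbs = n := Int.natAbs_natCast n
        rw [hnat, pvDigitLoop_eq n n 0 le_rfl]
        simpa using ih (pvDss n) g' b h (by omega)

-- ===== VERDICT (by name: the statement is the Claim_ definition above) =====
set_option maxRecDepth 10000 in
theorem number_square_spec : Claim_equal_number_square := by
  intro x _ hpre
  unfold Spec_number_square
  have hx : (1 : Int) ≤ x := hpre
  obtain ⟨n, rfl⟩ : ∃ n : Nat, x = (n : Int) := ⟨x.toNat, by omega⟩
  have hn : 1 ≤ n := by exact_mod_cast hx
  obtain ⟨b, hb⟩ := Option.isSome_iff_exists.mp (pvHits_total n hn)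
  have hnat : (n : Int).natAbs = n := Int.natAbs_natCast n
  -- B's side
  have hB : number_square_alt (n : Int) = b := by
    rw [number_square_alt, hnat]
    exact pvOuterLoop_eq (n + 50) n (n + 1000) b hb (by omega)
  -- A's side: feed pvGoA_eq a settled chain starting at pvDss n
  have hA : number_square (n : Int) = b := by
    rw [number_square, hnat]
    have : n + 1000 = (n + 999) + 1 := by omega
    rw [this]
    by_cases h1 : n = 1
    · subst h1
      have hb' : b = false := by
        have h51 : pvHits (1 + 50) 1 = some false := by decide
        rw [h51] at hb; exact (Option.some_inj.mp hb).symm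
      refine pvGoA_eq 1 1 (1 + 999) b ?_ (by omega)
      rw [hb']; decide
    · by_cases h89 : n = 89
      · subst h89
        have hbtrue : b = true := by
          have : pvHits (89 + 50) 89 = some true := by decide
          rw [this] at hb; exact (Option.some_inj.mp hb).symm
        have h145 : pvHits 20 145 = some true := by decide
        have hd89 : pvDss 89 = 145 := by decide
        refine pvGoA_eq 20 89 (89 + 999) b ?_ (by omega)
        rw [hd89, h145, hbtrue]
      · have hstep : pvHits (n + 50) n = pvHits (n + 49) (pvDss n) := by
          simp [pvHits, h1, h89]
        rw [hstep] at hb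
        exact pvGoA_eq (n + 49) n (n + 999) b hb (by omega)
  rw [hA, hB]
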